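-- pv_equiv track=rewrite | github.com/Elijah-Ang/Python-Game-2 | api/app/curriculum/__init__.py | extract_expected_output
-- ===== SOURCE A (Python) =====
-- def extract_expected_output(content: str) -> str:
--     """Try to extract expected output from lesson content."""
--     # Look for output examples in the content
--     lines = content.split("\n")
--     output_lines = []
--     in_output = False
--
--     for line in lines:
--         if "Output:" in line or "output:" in line:
--             in_output = True
--             continue
--         if in_output:
--             if line.startswith("```") or line.startswith("#") or line.startswith("##"):
--                 break
--             if line.strip():
--                 output_lines.append(line.strip())
--                 if len(output_lines) >= 3:
--                     break
--
--     if output_lines: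
--         return "\n".join(output_lines)
--
--     # Default helpful message
--     return "Run your code to see the output!"
-- ===== SOURCE B (Python) =====
-- def extract_expected_output(content: str) -> str:
--     """Try to extract expected output from lesson content."""
--     lines = content.split("\n")
--
--     def is_marker(l):
--         return "Output:" in l or "output:" in l
--
--     # Pass 1: indices of marker lines; no marker -> default message.
--     marks = [i for i, l in enumerate(lines) if is_marker(l)]
--     if not marks:
--         return "Run your code to see the output!"
--     tail = lines[marks[0] + 1:]
--
--     # Pass 2: indices of terminator lines (non-marker lines opening a fence
--     # or heading); the region is everything before the first terminator.
--     stops = [i for i, l in enumerate(tail)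
--              if not is_marker(l) and (l.startswith("```") or l.startswith("#"))]
--     region = tail[:stops[0]] if stops else tail
--
--     # Pass 3: strip, drop marker/blank lines, cap at three.
--     collected = [l.strip() for l in region if not is_marker(l) and l.strip()][:3]
--     return "\n".join(collected) if collected else "Run your code to see the output!"
-- ===== Notes on version B (the rewrite author's own statement) =====
-- stated objective: alternative
-- what changed: B replaces A's single stateful scan (in_output flag, accumulator with early breaks) by three declarative staged passes: an index comprehension locating the first marker, an index comprehension locating the first terminator to slice out the output region, and a filter-map comprehension truncated to three lines.
import Mathlib
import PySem

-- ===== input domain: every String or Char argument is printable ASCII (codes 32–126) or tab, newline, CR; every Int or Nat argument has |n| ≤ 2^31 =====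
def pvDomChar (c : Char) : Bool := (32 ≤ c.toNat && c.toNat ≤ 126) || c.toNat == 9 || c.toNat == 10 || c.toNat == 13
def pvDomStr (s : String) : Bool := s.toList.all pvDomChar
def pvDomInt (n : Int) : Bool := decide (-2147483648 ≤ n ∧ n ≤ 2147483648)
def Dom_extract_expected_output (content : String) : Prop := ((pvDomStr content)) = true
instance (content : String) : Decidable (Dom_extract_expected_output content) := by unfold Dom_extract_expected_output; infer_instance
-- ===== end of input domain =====

-- B replaces A's single stateful flag-and-break scan by three declarative staged passes
-- (marker indices, terminator indices, filter-map capped at three); same return value.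

-- ===== PORT A =====
def pvMarker (line : String) : Bool :=
  PySem.Str.isIn "Output:" line || PySem.Str.isIn "output:" line

-- A's for-loop: state = collected lines so far + in_output flag; 'break' returns the accumulator.
def pvLoopA : List String → List String → Bool → List String
  | [], acc, _ => acc
  | l :: rest, acc, inOut =>
    if pvMarker l then pvLoopA rest acc true
    else if inOut then
      if PySem.Str.startswith l "```" || PySem.Str.startswith l "#" || PySem.Str.startswith l "##" then acc
      else if PySem.Str.strip l ≠ "" then
        let acc' := acc ++ [PySem.Str.strip l]
        if acc'.length ≥ 3 then acc' else pvLoopA rest acc' true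
      else pvLoopA rest acc true
    else pvLoopA rest acc false

def extract_expected_output (content : String) : String :=
  let lines := (PySem.Str.split? content "\n").getD []
  let output_lines := pvLoopA lines [] false
  if output_lines ≠ [] then PySem.Str.join "\n" output_lines
  else "Run your code to see the output!"

-- ===== PORT B =====
-- Source B's terminator test: a non-marker line opening a fence or heading
def pvStop (l : String) : Bool :=
  !pvMarker l && (PySem.Str.startswith l "```" || PySem.Str.startswith l "#")

def extract_expected_output_alt (content : String) : String :=
  let lines := (PySem.Str.split? content "\n").getD []
  -- marks = [i for i, l in enumerate(lines) if is_marker(l)]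
  let marks := ((PySem.List.enumerate lines 0).filter (fun p => pvMarker p.2)).map Prod.fst
  match marks with
  | [] => "Run your code to see the output!"
  | m :: _ =>
    -- tail = lines[marks[0]+1:]
    let tail := PySem.List.slice lines (some (m + 1)) none
    -- stops = [i for i, l in enumerate(tail) if not is_marker(l) and (fence or heading)]
    let stops := ((PySem.List.enumerate tail 0).filter (fun p => pvStop p.2)).map Prod.fst
    -- region = tail[:stops[0]] if stops else tail
    let region := match stops with
      | [] => tail
      | s :: _ => PySem.List.slice tail none (some s)
    -- collected = [l.strip() for l in region if not is_marker(l) and l.strip()][:3]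
    let collected := PySem.List.slice
      ((region.filter (fun l => !pvMarker l && decide (PySem.Str.strip l ≠ ""))).map PySem.Str.strip)
      none (some 3)
    if collected ≠ [] then PySem.Str.join "\n" collected
    else "Run your code to see the output!"

-- ===== PRECONDITION & SPEC =====
def Spec_extract_expected_output (content : String) (out : String) : Prop := out = extract_expected_output_alt content
instance (content : String) (out : String) : Decidable (Spec_extract_expected_output content out) := by unfold Spec_extract_expected_output; infer_instance

-- ===== CLAIM (what is proved, stated in full; the proofs are below) =====
def Claim_equal_extract_expected_output : Prop := ∀ (content : String), Dom_extract_expected_output content → Spec_extract_expected_output content (extract_expected_output content)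

-- ===== LEMMAS AND PROOFS =====

-- first index where predicate p holds (proof-side characterisation of B's index comprehensions)
def pvFirstIdx (p : String → Bool) : List String → Option Nat
  | [] => none
  | l :: rest => if p l then some 0 else (pvFirstIdx p rest).map (· + 1)

-- B's '[i for i,l in enumerate(xs, s) if p l]' head behaviour
theorem pvEnumFilter_head (p : String → Bool) (xs : List String) : ∀ s : Int,
    ((PySem.List.enumerate xs s).filter (fun q => p q.2)).map Prod.fst
      = (match pvFirstIdx p xs with
         | none => ([] : List Int)
         | some k => (s + k) :: (((PySem.List.enumerate (xs.drop (k+1)) (s + k + 1)).filter (fun q => p q.2)).map Prod.fst)) := by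
  induction xs with
  | nil => intro s; rfl
  | cons l rest ih =>
    intro s
    rw [PySem.List.enumerate_cons]
    by_cases h : p l
    · simp [pvFirstIdx, h, List.filter]
    · simp only [pvFirstIdx, h, List.filter_cons, Bool.false_eq_true, if_false]
      rw [ih (s+1)]
      cases hk : pvFirstIdx p rest with
      | none => simp
      | some k =>
        simp only [Option.map_some]
        have h1 : s + 1 + (k : Int) = s + ((k : Nat) + 1 : Nat) := by push_cast; ring
        have h2 : s + 1 + (k : Int) + 1 = s + ((k : Nat) + 1 : Nat) + 1 := by push_cast; ring
        simp [h1]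

-- A's pre-marker scan reaches the suffix after the first marker line
theorem pvLoopA_false_eq (xs : List String) : ∀ acc,
    pvLoopA xs acc false =
      (match pvFirstIdx pvMarker xs with
       | none => acc
       | some k => pvLoopA (xs.drop (k+1)) acc true) := by
  induction xs with
  | nil => intro acc; rfl
  | cons l rest ih =>
    intro acc
    simp only [pvLoopA, pvFirstIdx]
    by_cases hm : pvMarker l
    · simp [hm]
    · simp only [hm, Bool.false_eq_true, if_false, ih acc]
      cases hk : pvFirstIdx pvMarker rest <;> simp

-- B's region (cut at first terminator) is a takeWhile
theorem pvRegion_eq_takeWhile (xs : List String) :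
    (match pvFirstIdx pvStop xs with
     | none => xs
     | some k => xs.take k) = xs.takeWhile (fun l => !pvStop l) := by
  induction xs with
  | nil => rfl
  | cons l rest ih =>
    simp only [pvFirstIdx]
    by_cases h : pvStop l
    · simp [h]
    · simp only [h, Bool.false_eq_true, if_false, List.takeWhile_cons, Bool.not_false, if_true]
      cases hk : pvFirstIdx pvStop rest with
      | none =>
        rw [hk] at ih; simp only at ih
        exact congrArg (List.cons l) ih
      | some k =>
        rw [hk] at ih; simp only at ih
        simp only [Option.map_some]
        rw [List.take_succ_cons, ih]

-- A's in-output scan equals B's filter-map over the takeWhile region, capped at 3 total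
theorem pvLoopA_true_eq (xs : List String) : ∀ acc, acc.length ≤ 2 →
    pvLoopA xs acc true =
      acc ++ (((xs.takeWhile (fun l => !pvStop l)).filter
                 (fun l => !pvMarker l && decide (PySem.Str.strip l ≠ ""))).map PySem.Str.strip).take (3 - acc.length) := by
  induction xs with
  | nil => intro acc _; simp [pvLoopA]
  | cons l rest ih =>
    intro acc hacc
    have himp : PySem.Str.startswith l "##" = true → PySem.Str.startswith l "#" = true := by
      simp only [PySem.Str.startswith_eq, PySem.Chars.startswith_iff]
      intro h
      exact List.IsPrefix.trans ⟨['#'], rfl⟩ h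
    have hcond : (PySem.Str.startswith l "```" || PySem.Str.startswith l "#" ||
        PySem.Str.startswith l "##")
        = (PySem.Str.startswith l "```" || PySem.Str.startswith l "#") := by
      cases h2 : PySem.Str.startswith l "##"
      · simp
      · rw [himp h2]; simp
    simp only [pvLoopA, hcond]
    by_cases hm : pvMarker l
    · -- marker line: A continues, B's region keeps it but the filter drops it
      have hstop : pvStop l = false := by simp [pvStop, hm]
      rw [if_pos hm, ih acc hacc]
      simp [hstop, hm]
    · have hm' : pvMarker l = false := by simpa using hm
      rw [if_neg hm, if_pos trivial]
      by_cases hbr : (PySem.Str.startswith l "```" || PySem.Str.startswith l "#") = true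
      · -- terminator: A breaks, B's region ends here
        have hstop : pvStop l = true := by unfold pvStop; rw [hm']; simpa using hbr
        rw [if_pos hbr]
        simp [hstop]
      · have hstop : pvStop l = false := by
          unfold pvStop; rw [hm']
          simpa using (Bool.eq_false_iff.mpr hbr)
        rw [if_neg hbr]
        by_cases hst : PySem.Str.strip l ≠ ""
        · rw [if_pos hst]
          have hcol : pvMarker l = false ∧ ¬ PySem.Str.strip l = "" := ⟨hm', hst⟩
          by_cases h2 : acc.length = 2
          · have : (acc ++ [PySem.Str.strip l]).length ≥ 3 := by simp [h2]
            rw [if_pos this]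
            have hd : decide (PySem.Str.strip l ≠ "") = true := decide_eq_true hst
            simp [hstop, hm', hst, h2]
          · have hlt : ¬ (acc ++ [PySem.Str.strip l]).length ≥ 3 := by simp; omega
            rw [if_neg hlt, ih _ (by simp; omega)]
            have hd : decide (PySem.Str.strip l ≠ "") = true := decide_eq_true hst
            have hlen : (acc ++ [PySem.Str.strip l]).length = acc.length + 1 := by simp
            simp only [List.takeWhile_cons, hstop, Bool.not_false, if_true, List.filter_cons,
              hm', hd, Bool.true_and, List.map_cons, hlen]
            have h3 : 3 - acc.length = (3 - (acc.length + 1)) + 1 := by omega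
            rw [h3, List.take_succ_cons, List.append_assoc]
            rfl
        · rw [if_neg hst, ih acc hacc]
          have hst' : PySem.Str.strip l = "" := not_not.mp hst
          simp [hstop, hst']

-- ===== VERDICT (by name: the statement is the Claim_ definition above) =====
theorem extract_expected_output_spec : Claim_equal_extract_expected_output := by
  intro content _
  unfold Spec_extract_expected_output extract_expected_output extract_expected_output_alt
  dsimp only
  set lines := (PySem.Str.split? content "\n").getD [] with hlines
  rw [pvLoopA_false_eq]
  simp only [pvEnumFilter_head pvMarker lines 0]
  cases hk : pvFirstIdx pvMarker lines with
  | none => simp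
  | some k =>
    simp only
    have htail : PySem.List.slice lines (some ((0 : Int) + (k : Int) + 1)) none = lines.drop (k + 1) := by
      have h0 : (0 : Int) + (k : Int) + 1 = ((k + 1 : Nat) : Int) := by push_cast; ring
      rw [h0, PySem.List.slice_from_natCast]
    simp only [htail]
    set tail := lines.drop (k + 1) with htl
    simp only [pvEnumFilter_head pvStop tail 0]
    have hslice3 : ∀ (ys : List String), PySem.List.slice ys none (some 3) = ys.take 3 := by
      intro ys; rw [PySem.List.slice_to ys (by norm_num : (0:Int) ≤ 3)]; rfl
    have hmain := pvLoopA_true_eq tail [] (by simp)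
    simp only [List.length_nil, Nat.sub_zero, List.nil_append] at hmain
    have hr := pvRegion_eq_takeWhile tail
    cases hs : pvFirstIdx pvStop tail with
    | none =>
      rw [hs] at hr; simp only at hr
      rw [← hr] at hmain
      simp only [hmain, hslice3]
    | some s =>
      rw [hs] at hr; simp only at hr
      have hsl : PySem.List.slice tail none (some ((0 : Int) + (s : Int))) = tail.take s := by
        have h0 : (0 : Int) + (s : Int) = ((s : Nat) : Int) := by omega
        rw [h0, PySem.List.slice_to_natCast]
      simp only [hsl, hr, hmain, hslice3]
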